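-- pv_equiv track=rewrite | github.com/pernici/hobj | src/graphs_gen.py | wanless_example1
-- ===== SOURCE A (Python) =====
-- def wanless_example1(k, f):
--     c1 = c2 = 0
--     d1 = {}
--     d2 = {}
--     d1['s'] = 0
--     c1 += 1
--     d2['t'] = 0
--     c2 += 1
--     for a in range(1, k + 1):
--         for b in range(1, k + 1):
--             for c in range(1, f + 1):
--                 d1[(a,b,c)] = c1
--                 c1 += 1
--                 d2[(a,b,c)] = c2
--                 c2 += 1
--     m = [[0]*len(d2) for i in range(len(d1))]
--     for a in range(1, k + 1):
--         for b in range(1, k + 1):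
--             for b1 in range(1, k + 1):
--                 for c in range(1, f + 1):
--                     if b == 1 and b1 == 1:
--                         continue
--                     r1 = d1[(a, b, c)]
--                     r2 = d2[(a, b1, c)]
--                     m[r1][r2] = 1
--     for a in range(1, k + 1):
--         for c in range(1, f):
--             r1 = d1[(a, 1, c)]
--             r2 = d2[(a, 1, c+1)]
--             m[r1][r2] = 1
--     for a in range(1, k + 1):
--         r1 = d1['s']
--         r2 = d2[(a, 1, 1)]
--         m[r1][r2] = 1
--     for a in range(1, k + 1):
--         r1 = d1[(a, 1, f)]
--         r2 = d2['t']
--         m[r1][r2] = 1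
--     return m
-- ===== SOURCE B (Python) =====
-- def wanless_example1(k, f):
--     K = max(k, 0)
--     F = max(f, 0)
--     N = K * K * F + 1
--     def cols(r):
--         # columns holding a 1 in row r, by the closed-form index 1 + (a*K + b)*F + c
--         if r == 0:
--             return [1 + a * K * F for a in range(K)]
--         q, c = divmod(r - 1, F)
--         a, b = divmod(q, K)
--         out = [1 + (a * K + b1) * F + c for b1 in range(K) if b > 0 or b1 > 0]
--         if b == 0:
--             out.append(1 + a * K * F + c + 1 if c + 1 < F else 0)
--         return out
--     def row(r):
--         out = [0] * N
--         for c in cols(r):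
--             out[c] = 1
--         return out
--     return [row(i) for i in range(N)]
-- ===== Notes on version B (the rewrite author's own statement) =====
-- stated objective: alternative
-- what changed: Replaces the dictionary-numbering pass and the four in-place fill loops over a mutable zero matrix by a direct row-by-row construction: each row index is decoded with divmod into its (a,b,c) triple and its 1-columns are computed by a closed-form index formula, so no dict and no mutation are needed.
import Mathlib
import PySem

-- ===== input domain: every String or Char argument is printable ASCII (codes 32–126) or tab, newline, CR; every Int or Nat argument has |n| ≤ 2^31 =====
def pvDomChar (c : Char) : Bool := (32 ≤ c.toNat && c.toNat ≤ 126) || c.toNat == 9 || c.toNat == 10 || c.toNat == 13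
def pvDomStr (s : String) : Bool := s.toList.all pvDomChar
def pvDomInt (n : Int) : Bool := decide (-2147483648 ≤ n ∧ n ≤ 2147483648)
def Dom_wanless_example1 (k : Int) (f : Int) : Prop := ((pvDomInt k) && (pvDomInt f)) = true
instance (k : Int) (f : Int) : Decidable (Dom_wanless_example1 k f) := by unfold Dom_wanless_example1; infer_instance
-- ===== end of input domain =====

-- B replaces A's dictionary-numbering pass and four in-place fill loops by a direct
-- row-by-row construction (divmod decode of the row index + closed-form column formula);
-- objective: alternative (no dict, no mutable matrix).


-- ===== PORT A =====
-- Python dict keys are the string 's' (resp. 't') and (a,b,c) int triples: one key type.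
inductive PyKey | s | t | abc (a b c : Int)
deriving DecidableEq, Repr

-- m[r1][r2] = 1 (exact wherever the Python assignment does not raise: pySetD/pyGetD
-- follow Python's indexing; under Pre_ every index A uses is in range)
def mset (m : List (List Int)) (i j : Int) : List (List Int) :=
  PySem.List.pySetD m i (PySem.List.pySetD (PySem.List.pyGetD m i []) j 1)

def wanless_example1 (k : Int) (f : Int) : List (List Int) :=
  let st0 : PySem.Dict PyKey Int × Int × PySem.Dict PyKey Int × Int :=
    (PySem.Dict.empty.insert PyKey.s 0, 1, PySem.Dict.empty.insert PyKey.t 0, 1)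
  let st := (PySem.List.pyRange 1 (k+1) 1).foldl (fun st a =>
      (PySem.List.pyRange 1 (k+1) 1).foldl (fun st b =>
        (PySem.List.pyRange 1 (f+1) 1).foldl (fun st c =>
          (st.1.insert (PyKey.abc a b c) st.2.1, st.2.1 + 1,
           st.2.2.1.insert (PyKey.abc a b c) st.2.2.2, st.2.2.2 + 1)) st) st) st0
  let d1 := st.1
  let d2 := st.2.2.1
  let m0 : List (List Int) := (PySem.List.pyRange 0 (d1.size : Int) 1).map
      (fun _ => PySem.List.pyRepeat [(0:Int)] (d2.size : Int))
  let m1 := (PySem.List.pyRange 1 (k+1) 1).foldl (fun m a =>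
      (PySem.List.pyRange 1 (k+1) 1).foldl (fun m b =>
        (PySem.List.pyRange 1 (k+1) 1).foldl (fun m b1 =>
          (PySem.List.pyRange 1 (f+1) 1).foldl (fun m c =>
            if b = 1 ∧ b1 = 1 then m
            else mset m (d1.getD (PyKey.abc a b c) 0) (d2.getD (PyKey.abc a b1 c) 0)) m) m) m) m0
  let m2 := (PySem.List.pyRange 1 (k+1) 1).foldl (fun m a =>
      (PySem.List.pyRange 1 f 1).foldl (fun m c =>
        mset m (d1.getD (PyKey.abc a 1 c) 0) (d2.getD (PyKey.abc a 1 (c+1)) 0)) m) m1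
  let m3 := (PySem.List.pyRange 1 (k+1) 1).foldl (fun m a =>
      mset m (d1.getD PyKey.s 0) (d2.getD (PyKey.abc a 1 1) 0)) m2
  let m4 := (PySem.List.pyRange 1 (k+1) 1).foldl (fun m a =>
      mset m (d1.getD (PyKey.abc a 1 f) 0) (d2.getD PyKey.t 0)) m3
  m4

-- ===== PORT B =====
-- the columns holding a 1 in row r (closed-form index 1 + (a*K + b)*F + c, 0-based triples)
def altCols (K F : Int) (r : Int) : List Int :=
  if r = 0 then (PySem.List.pyRange 0 K 1).map (fun a => 1 + a * K * F)
  else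
    let q := PySem.Int.floordiv (r - 1) F
    let c := PySem.Int.mod (r - 1) F
    let a := PySem.Int.floordiv q K
    let b := PySem.Int.mod q K
    let out := ((PySem.List.pyRange 0 K 1).filter
        (fun b1 => decide (0 < b) || decide (0 < b1))).map (fun b1 => 1 + (a * K + b1) * F + c)
    if b = 0 then out ++ [if c + 1 < F then 1 + a * K * F + c + 1 else 0] else out

-- row r: a zero row of length N with the 1-columns of row r set
def altRow (N : Int) (cs : List Int) : List Int :=
  cs.foldl (fun out c => PySem.List.pySetD out c 1) (PySem.List.pyRepeat [(0:Int)] N)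

def wanless_example1_alt (k : Int) (f : Int) : List (List Int) :=
  let K := max k 0
  let F := max f 0
  let N := K * K * F + 1
  (PySem.List.pyRange 0 N 1).map (fun i => altRow N (altCols K F i))

-- ===== PRECONDITION & SPEC =====
-- Pre_ excludes exactly k >= 1 with f <= 0, where A's source/sink fill loops look up triples
-- the (empty) numbering pass never inserted and raise KeyError (B also raises there).
def Pre_wanless_example1 (k : Int) (f : Int) : Prop := k ≤ 0 ∨ 1 ≤ f
instance (k : Int) (f : Int) : Decidable (Pre_wanless_example1 k f) := by
  unfold Pre_wanless_example1; infer_instance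
def pvWitness_wanless_example1 : Int × Int := (2, 2)

def Spec_wanless_example1 (k : Int) (f : Int) (out : List (List Int)) : Prop :=
  out = wanless_example1_alt k f
instance (k : Int) (f : Int) (out : List (List Int)) : Decidable (Spec_wanless_example1 k f out) := by
  unfold Spec_wanless_example1; infer_instance

-- ===== CLAIM (what is proved, stated in full; the proofs are below) =====
def Claim_equal_wanless_example1 : Prop := ∀ (k : Int) (f : Int), Dom_wanless_example1 k f →
  Pre_wanless_example1 k f → Spec_wanless_example1 k f (wanless_example1 k f)
-- ===== LEMMAS AND PROOFS =====

def pstep (p : PySem.Dict PyKey Int × Int) (x : PyKey) : PySem.Dict PyKey Int × Int :=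
  (p.1.insert x p.2, p.2 + 1)
def keyBlk (as bs cs : List Int) : List PyKey :=
  as.flatMap (fun a => bs.flatMap (fun b => cs.map (fun c => PyKey.abc a b c)))

lemma lvl3 (cs : List Int) (g : Int → PyKey)
    (st : PySem.Dict PyKey Int × Int × PySem.Dict PyKey Int × Int) :
    cs.foldl (fun st c =>
        (st.1.insert (g c) st.2.1, st.2.1 + 1,
         st.2.2.1.insert (g c) st.2.2.2, st.2.2.2 + 1)) st
    = (((cs.map g).foldl pstep (st.1, st.2.1)).1, ((cs.map g).foldl pstep (st.1, st.2.1)).2,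
       ((cs.map g).foldl pstep (st.2.2.1, st.2.2.2)).1,
       ((cs.map g).foldl pstep (st.2.2.1, st.2.2.2)).2) := by
  induction cs generalizing st with
  | nil => rfl
  | cons c cs ih => simp only [List.foldl_cons, List.map_cons, ih, pstep]

lemma lvl_gen {α : Type} (l : List α) (ks : α → List PyKey)
    (st : PySem.Dict PyKey Int × Int × PySem.Dict PyKey Int × Int) :
    l.foldl (fun st x =>
        (((ks x).foldl pstep (st.1, st.2.1)).1, ((ks x).foldl pstep (st.1, st.2.1)).2,
         ((ks x).foldl pstep (st.2.2.1, st.2.2.2)).1,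
         ((ks x).foldl pstep (st.2.2.1, st.2.2.2)).2)) st
    = (((l.flatMap ks).foldl pstep (st.1, st.2.1)).1,
       ((l.flatMap ks).foldl pstep (st.1, st.2.1)).2,
       ((l.flatMap ks).foldl pstep (st.2.2.1, st.2.2.2)).1,
       ((l.flatMap ks).foldl pstep (st.2.2.1, st.2.2.2)).2) := by
  induction l generalizing st with
  | nil => rfl
  | cons x l ih => simp only [List.foldl_cons, List.flatMap_cons, List.foldl_append, ih]

lemma quad_eq (as bs cs : List Int)
    (st : PySem.Dict PyKey Int × Int × PySem.Dict PyKey Int × Int) :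
    as.foldl (fun st a => bs.foldl (fun st b => cs.foldl (fun st c =>
        (st.1.insert (PyKey.abc a b c) st.2.1, st.2.1 + 1,
         st.2.2.1.insert (PyKey.abc a b c) st.2.2.2, st.2.2.2 + 1)) st) st) st
    = (((keyBlk as bs cs).foldl pstep (st.1, st.2.1)).1,
       ((keyBlk as bs cs).foldl pstep (st.1, st.2.1)).2,
       ((keyBlk as bs cs).foldl pstep (st.2.2.1, st.2.2.2)).1,
       ((keyBlk as bs cs).foldl pstep (st.2.2.1, st.2.2.2)).2) := by
  have h1 : (fun (st : PySem.Dict PyKey Int × Int × PySem.Dict PyKey Int × Int) (a : Int) =>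
      bs.foldl (fun st b => cs.foldl (fun st c =>
        (st.1.insert (PyKey.abc a b c) st.2.1, st.2.1 + 1,
         st.2.2.1.insert (PyKey.abc a b c) st.2.2.2, st.2.2.2 + 1)) st) st)
      = (fun st a =>
        (((bs.flatMap (fun b => cs.map (fun c => PyKey.abc a b c))).foldl pstep (st.1, st.2.1)).1,
         ((bs.flatMap (fun b => cs.map (fun c => PyKey.abc a b c))).foldl pstep (st.1, st.2.1)).2,
         ((bs.flatMap (fun b => cs.map (fun c => PyKey.abc a b c))).foldl pstep (st.2.2.1, st.2.2.2)).1,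
         ((bs.flatMap (fun b => cs.map (fun c => PyKey.abc a b c))).foldl pstep (st.2.2.1, st.2.2.2)).2)) := by
    funext st a
    have h2 : (fun (st : PySem.Dict PyKey Int × Int × PySem.Dict PyKey Int × Int) (b : Int) =>
        cs.foldl (fun st c =>
          (st.1.insert (PyKey.abc a b c) st.2.1, st.2.1 + 1,
           st.2.2.1.insert (PyKey.abc a b c) st.2.2.2, st.2.2.2 + 1)) st)
        = (fun st b =>
          (((cs.map (fun c => PyKey.abc a b c)).foldl pstep (st.1, st.2.1)).1,
           ((cs.map (fun c => PyKey.abc a b c)).foldl pstep (st.1, st.2.1)).2,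
           ((cs.map (fun c => PyKey.abc a b c)).foldl pstep (st.2.2.1, st.2.2.2)).1,
           ((cs.map (fun c => PyKey.abc a b c)).foldl pstep (st.2.2.1, st.2.2.2)).2)) := by
      funext st b
      exact lvl3 cs (fun c => PyKey.abc a b c) st
    rw [h2]
    exact lvl_gen bs (fun b => cs.map (fun c => PyKey.abc a b c)) st
  rw [h1]
  exact lvl_gen as (fun a => bs.flatMap (fun b => cs.map (fun c => PyKey.abc a b c))) st

lemma pfold_snd (ks : List PyKey) (d : PySem.Dict PyKey Int) (c : Int) :
    (ks.foldl pstep (d, c)).2 = c + ks.length := by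
  induction ks generalizing d c with
  | nil => simp
  | cons x ks ih => simp [pstep, ih]; omega

lemma pfold_get_notmem (ks : List PyKey) (key : PyKey) (h : key ∉ ks)
    (d : PySem.Dict PyKey Int) (c : Int) :
    (ks.foldl pstep (d, c)).1.get? key = d.get? key := by
  induction ks generalizing d c with
  | nil => rfl
  | cons x ks ih =>
    simp only [List.mem_cons, not_or] at h
    simp only [List.foldl_cons, pstep]
    rw [ih h.2, PySem.Dict.get?_insert_of_ne _ _ h.1]

lemma pfold_get_mid (l1 l2 : List PyKey) (key : PyKey) (h : key ∉ l2)
    (d : PySem.Dict PyKey Int) (c : Int) :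
    ((l1 ++ key :: l2).foldl pstep (d, c)).1.get? key = some (c + l1.length) := by
  rw [List.foldl_append, List.foldl_cons]
  have h2 : (l1.foldl pstep (d, c)).2 = c + l1.length := pfold_snd l1 d c
  rw [show pstep (l1.foldl pstep (d, c)) key
      = ((l1.foldl pstep (d, c)).1.insert key (c + l1.length), (l1.foldl pstep (d, c)).2 + 1) by
    simp [pstep, h2]]
  rw [pfold_get_notmem l2 key h]
  exact PySem.Dict.get?_insert_self _ _ _

lemma pfold_size (ks : List PyKey) (d : PySem.Dict PyKey Int) (c : Int)
    (hfresh : ∀ x ∈ ks, d.contains x = false) (hnd : ks.Nodup) :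
    (ks.foldl pstep (d, c)).1.size = d.size + ks.length := by
  induction ks generalizing d c with
  | nil => simp
  | cons x ks ih =>
    simp only [List.foldl_cons, pstep]
    have hx := hfresh x (by simp)
    rw [ih _ _ ?_ hnd.of_cons]
    · rw [PySem.Dict.size_insert]
      simp [hx]; omega
    · intro y hy
      rw [PySem.Dict.contains_insert]
      have : y ≠ x := by rintro rfl; exact (List.nodup_cons.mp hnd).1 hy
      simp [this, hfresh y (by simp [hy])]

lemma mem_keyBlk (as bs cs : List Int) (a b c : Int) :
    PyKey.abc a b c ∈ keyBlk as bs cs ↔ a ∈ as ∧ b ∈ bs ∧ c ∈ cs := by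
  simp [keyBlk, List.mem_flatMap, List.mem_map, PyKey.abc.injEq]

lemma s_notmem_keyBlk (as bs cs : List Int) : PyKey.s ∉ keyBlk as bs cs := by
  simp [keyBlk, List.mem_flatMap, List.mem_map]

lemma t_notmem_keyBlk (as bs cs : List Int) : PyKey.t ∉ keyBlk as bs cs := by
  simp [keyBlk, List.mem_flatMap, List.mem_map]

lemma nodup_keyBlk (as bs cs : List Int) (ha : as.Nodup) (hb : bs.Nodup) (hc : cs.Nodup) :
    (keyBlk as bs cs).Nodup := by
  unfold keyBlk
  rw [List.nodup_flatMap]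
  constructor
  · intro a _
    rw [List.nodup_flatMap]
    constructor
    · intro b _
      exact hc.map (fun c c' h => by injection h)
    · refine hb.imp ?_
      intro b b' hne
      intro x h1 h2
      simp only [List.mem_map] at h1 h2
      obtain ⟨c, _, rfl⟩ := h1
      obtain ⟨c', _, h⟩ := h2
      injection h with h1 h2 h3
      exact hne h2.symm
  · refine ha.imp ?_
    intro a a' hne x h1 h2
    simp only [Function.onFun, List.mem_flatMap, List.mem_map] at h1 h2
    obtain ⟨b, _, c, _, rfl⟩ := h1
    obtain ⟨b', _, c', _, h⟩ := h2
    injection h with h1 h2 h3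
    exact hne h1.symm

lemma len_keyBlk (x y u v w z : Int) :
    (keyBlk (PySem.List.pyRange x y 1) (PySem.List.pyRange u v 1)
      (PySem.List.pyRange w z 1)).length
    = (y - x).toNat * ((v - u).toNat * (z - w).toNat) := by
  simp [keyBlk, List.length_flatMap, PySem.List.length_pyRange_one, Function.comp_def,
    List.map_const', List.sum_replicate, smul_eq_mul]

def idx (k f a b c : Int) : Int := 1 + ((a - 1) * k + (b - 1)) * f + (c - 1)

lemma keyBlk_append1 (xs ys bs cs : List Int) :
    keyBlk (xs ++ ys) bs cs = keyBlk xs bs cs ++ keyBlk ys bs cs := by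
  simp [keyBlk]

lemma keyBlk_single (a : Int) (bs cs : List Int) :
    keyBlk [a] bs cs = bs.flatMap (fun b => cs.map (fun c => PyKey.abc a b c)) := by
  simp [keyBlk]

lemma dict_get_abc (k f : Int) (hk : 1 ≤ k) (hf : 1 ≤ f) (a b c : Int)
    (ha : 1 ≤ a ∧ a ≤ k) (hb : 1 ≤ b ∧ b ≤ k) (hc : 1 ≤ c ∧ c ≤ f)
    (d : PySem.Dict PyKey Int) :
    ((keyBlk (PySem.List.pyRange 1 (k+1) 1) (PySem.List.pyRange 1 (k+1) 1)
        (PySem.List.pyRange 1 (f+1) 1)).foldl pstep (d, 1)).1.get? (PyKey.abc a b c)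
    = some (idx k f a b c) := by
  have hA : PySem.List.pyRange 1 (k+1) 1
      = PySem.List.pyRange 1 a 1 ++ [a] ++ PySem.List.pyRange (a+1) (k+1) 1 := by
    rw [PySem.List.pyRange_one_append 1 a (k+1) (by omega) (by omega),
        PySem.List.pyRange_one_append a (a+1) (k+1) (by omega) (by omega),
        PySem.List.pyRange_one_singleton, List.append_assoc]
  have hB : PySem.List.pyRange 1 (k+1) 1
      = PySem.List.pyRange 1 b 1 ++ [b] ++ PySem.List.pyRange (b+1) (k+1) 1 := by
    rw [PySem.List.pyRange_one_append 1 b (k+1) (by omega) (by omega),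
        PySem.List.pyRange_one_append b (b+1) (k+1) (by omega) (by omega),
        PySem.List.pyRange_one_singleton, List.append_assoc]
  have hC : PySem.List.pyRange 1 (f+1) 1
      = PySem.List.pyRange 1 c 1 ++ [c] ++ PySem.List.pyRange (c+1) (f+1) 1 := by
    rw [PySem.List.pyRange_one_append 1 c (f+1) (by omega) (by omega),
        PySem.List.pyRange_one_append c (c+1) (f+1) (by omega) (by omega),
        PySem.List.pyRange_one_singleton, List.append_assoc]
  -- decompose the key list as L1 ++ key :: L2
  have hmid : keyBlk [a] (PySem.List.pyRange 1 (k+1) 1) (PySem.List.pyRange 1 (f+1) 1)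
      = keyBlk [a] (PySem.List.pyRange 1 b 1) (PySem.List.pyRange 1 (f+1) 1)
        ++ ((PySem.List.pyRange 1 c 1).map (fun c' => PyKey.abc a b c')
            ++ PyKey.abc a b c ::
               (PySem.List.pyRange (c+1) (f+1) 1).map (fun c' => PyKey.abc a b c'))
        ++ keyBlk [a] (PySem.List.pyRange (b+1) (k+1) 1) (PySem.List.pyRange 1 (f+1) 1) := by
    rw [keyBlk_single, hB, List.flatMap_append, List.flatMap_append]
    rw [keyBlk_single, keyBlk_single]
    congr 1
    congr 1
    rw [show (([b] : List Int).flatMap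
          (fun b' => (PySem.List.pyRange 1 (f+1) 1).map (fun c' => PyKey.abc a b' c')))
        = (PySem.List.pyRange 1 (f+1) 1).map (fun c' => PyKey.abc a b c') by simp]
    rw [hC, List.map_append, List.map_append]
    simp
  have hdecomp : keyBlk (PySem.List.pyRange 1 (k+1) 1) (PySem.List.pyRange 1 (k+1) 1)
        (PySem.List.pyRange 1 (f+1) 1)
      = (keyBlk (PySem.List.pyRange 1 a 1) (PySem.List.pyRange 1 (k+1) 1)
            (PySem.List.pyRange 1 (f+1) 1)
          ++ keyBlk [a] (PySem.List.pyRange 1 b 1) (PySem.List.pyRange 1 (f+1) 1)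
          ++ (PySem.List.pyRange 1 c 1).map (fun c' => PyKey.abc a b c'))
        ++ PyKey.abc a b c ::
        ((PySem.List.pyRange (c+1) (f+1) 1).map (fun c' => PyKey.abc a b c')
          ++ keyBlk [a] (PySem.List.pyRange (b+1) (k+1) 1) (PySem.List.pyRange 1 (f+1) 1)
          ++ keyBlk (PySem.List.pyRange (a+1) (k+1) 1) (PySem.List.pyRange 1 (k+1) 1)
            (PySem.List.pyRange 1 (f+1) 1)) := by
    nth_rewrite 1 [hA]
    rw [keyBlk_append1, keyBlk_append1, hmid]
    simp [List.append_assoc]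
  rw [hdecomp, pfold_get_mid]
  · congr 1
    have e1 : (keyBlk (PySem.List.pyRange 1 a 1) (PySem.List.pyRange 1 (k+1) 1)
          (PySem.List.pyRange 1 (f+1) 1)).length
        = (a-1).toNat * (k.toNat * f.toNat) := by
      rw [len_keyBlk]; congr 2 <;> omega
    have e2 : (keyBlk [a] (PySem.List.pyRange 1 b 1) (PySem.List.pyRange 1 (f+1) 1)).length
        = (b-1).toNat * f.toNat := by
      rw [show ([a] : List Int) = PySem.List.pyRange a (a+1) 1 from
        (PySem.List.pyRange_one_singleton a).symm, len_keyBlk]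
      rw [show (a+1-a).toNat = 1 by omega]
      rw [show (f+1-1).toNat = f.toNat by omega]
      omega
    have e3 : ((PySem.List.pyRange 1 c 1).map (fun c' => PyKey.abc a b c')).length
        = (c-1).toNat := by
      simp [PySem.List.length_pyRange_one]
    simp only [List.length_append, e1, e2, e3]
    unfold idx
    push_cast [Int.toNat_of_nonneg (show (0:Int) ≤ a - 1 by omega),
      Int.toNat_of_nonneg (show (0:Int) ≤ b - 1 by omega),
      Int.toNat_of_nonneg (show (0:Int) ≤ c - 1 by omega),
      Int.toNat_of_nonneg (show (0:Int) ≤ k by omega),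
      Int.toNat_of_nonneg (show (0:Int) ≤ f by omega)]
    ring
  · -- the key does not occur later
    intro hmem
    simp only [List.mem_append, List.mem_map, List.mem_cons] at hmem
    rcases hmem with (⟨c', hc', he⟩ | hm) | hm
    · rw [PySem.List.mem_pyRange_one] at hc'
      injection he with h1 h2 h3
      omega
    · rw [keyBlk_single] at hm
      simp only [List.mem_flatMap, List.mem_map] at hm
      obtain ⟨b', hb', c', hc', he⟩ := hm
      rw [PySem.List.mem_pyRange_one] at hb'
      injection he with h1 h2 h3
      omega
    · rw [mem_keyBlk, PySem.List.mem_pyRange_one] at hm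
      omega

lemma idx_bounds (k f a b c : Int) (hk : 1 ≤ k) (hf : 1 ≤ f)
    (ha : 1 ≤ a ∧ a ≤ k) (hb : 1 ≤ b ∧ b ≤ k) (hc : 1 ≤ c ∧ c ≤ f) :
    1 ≤ idx k f a b c ∧ idx k f a b c ≤ k * k * f := by
  unfold idx
  obtain ⟨ha1, ha2⟩ := ha; obtain ⟨hb1, hb2⟩ := hb; obtain ⟨hc1, hc2⟩ := hc
  have t1 : 0 ≤ (a - 1) * k := mul_nonneg (by omega) (by omega)
  have t2 : 0 ≤ ((a - 1) * k + (b - 1)) * f :=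
    mul_nonneg (by linarith) (by omega)
  have u1 : (a - 1) * k ≤ (k - 1) * k := mul_le_mul_of_nonneg_right (by omega) (by omega)
  have u2 : ((a - 1) * k + (b - 1)) * f ≤ (k * k - 1) * f :=
    mul_le_mul_of_nonneg_right (by nlinarith) (by omega)
  constructor
  · linarith
  · nlinarith

lemma dm_uniq (x q r g : Int) (hg : 0 < g) (h : x = q * g + r) (hr0 : 0 ≤ r) (hr1 : r < g) :
    PySem.Int.floordiv x g = q ∧ PySem.Int.mod x g = r := by
  have h1 : PySem.Int.floordiv x g = q := by
    rw [PySem.Int.floordiv_eq_iff_of_pos hg]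
    subst h
    constructor
    · nlinarith
    · nlinarith
  refine ⟨h1, ?_⟩
  have := PySem.Int.floordiv_mul_add_mod x g
  rw [h1] at this
  omega

def ent (m : List (List Int)) (i j : Nat) : Int := (m.getD i []).getD j 0

def Shape (m : List (List Int)) (n : Nat) : Prop :=
  m.length = n ∧ ∀ i, i < n → (m.getD i []).length = n

lemma getD_set (xs : List (List Int)) (a : Nat) (v : List Int) (i : Nat) :
    (xs.set a v).getD i [] = if i = a ∧ a < xs.length then v else xs.getD i [] := by
  rw [List.getD_eq_getElem?_getD, List.getD_eq_getElem?_getD, List.getElem?_set]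
  by_cases h1 : a = i
  · subst h1
    by_cases h2 : a < xs.length <;> simp [h2]
  · rw [if_neg h1, if_neg (by rintro ⟨rfl, _⟩; exact h1 rfl)]

lemma getD_set_int (xs : List Int) (a : Nat) (v : Int) (i : Nat) :
    (xs.set a v).getD i 0 = if i = a ∧ a < xs.length then v else xs.getD i 0 := by
  rw [List.getD_eq_getElem?_getD, List.getD_eq_getElem?_getD, List.getElem?_set]
  by_cases h1 : a = i
  · subst h1
    by_cases h2 : a < xs.length <;> simp [h2]
  · rw [if_neg h1, if_neg (by rintro ⟨rfl, _⟩; exact h1 rfl)]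

lemma shape_mset (m : List (List Int)) (n : Nat) (hS : Shape m n) (r1 r2 : Int)
    (h1 : 0 ≤ r1) (h1' : r1 < (n : Int)) : Shape (mset m r1 r2) n := by
  obtain ⟨hlen, hrow⟩ := hS
  unfold mset
  rw [PySem.List.pySetD_of_nonneg _ _ h1]
  constructor
  · simp [hlen]
  · intro i hi
    rw [getD_set]
    split_ifs with h
    · rw [PySem.List.length_pySetD, PySem.List.pyGetD_of_nonneg _ _ h1]
      exact hrow r1.toNat (by omega)
    · exact hrow i hi

lemma ent_mset (m : List (List Int)) (n : Nat) (hS : Shape m n) (r1 r2 : Int)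
    (h1 : 0 ≤ r1) (h1' : r1 < (n : Int)) (h2 : 0 ≤ r2) (h2' : r2 < (n : Int)) (i j : Nat) :
    ent (mset m r1 r2) i j = if (i : Int) = r1 ∧ (j : Int) = r2 then 1 else ent m i j := by
  obtain ⟨hlen, hrow⟩ := hS
  unfold mset ent
  rw [PySem.List.pySetD_of_nonneg _ _ h1, PySem.List.pySetD_of_nonneg _ _ h2,
      PySem.List.pyGetD_of_nonneg _ _ h1]
  rw [getD_set]
  have hr1n : r1.toNat < m.length := by omega
  by_cases hi : i = r1.toNat
  · subst hi
    rw [if_pos ⟨rfl, hr1n⟩, getD_set_int]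
    have hrl : (m.getD r1.toNat []).length = n := hrow r1.toNat (by omega)
    by_cases hj : j = r2.toNat
    · subst hj
      rw [if_pos ⟨rfl, by omega⟩, if_pos ⟨by omega, by omega⟩]
    · rw [if_neg (fun hc => hj hc.1), if_neg (fun hc => hj (by omega))]
  · rw [if_neg (fun hc => hi hc.1), if_neg (fun hc => hi (by omega))]

lemma fill_fold {α : Type} (l : List α) (r1 r2 : α → Int) (n : Nat) :
    ∀ (m : List (List Int)), Shape m n →
    (∀ e ∈ l, (0 ≤ r1 e ∧ r1 e < (n : Int)) ∧ (0 ≤ r2 e ∧ r2 e < (n : Int))) →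
    Shape (l.foldl (fun m e => mset m (r1 e) (r2 e)) m) n ∧
    (∀ i j : Nat, (∃ e ∈ l, r1 e = (i : Int) ∧ r2 e = (j : Int)) →
      ent (l.foldl (fun m e => mset m (r1 e) (r2 e)) m) i j = 1) ∧
    (∀ i j : Nat, (¬ ∃ e ∈ l, r1 e = (i : Int) ∧ r2 e = (j : Int)) →
      ent (l.foldl (fun m e => mset m (r1 e) (r2 e)) m) i j = ent m i j) := by
  induction l with
  | nil => intro m hS _; exact ⟨hS, by simp, by simp⟩
  | cons e0 l ih =>
    intro m hS hr
    have he0 := hr e0 (by simp)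
    have hS' : Shape (mset m (r1 e0) (r2 e0)) n :=
      shape_mset m n hS _ _ he0.1.1 he0.1.2
    have hr' : ∀ e ∈ l, (0 ≤ r1 e ∧ r1 e < (n : Int)) ∧ (0 ≤ r2 e ∧ r2 e < (n : Int)) :=
      fun e he => hr e (by simp [he])
    obtain ⟨ihS, ih1, ih0⟩ := ih (mset m (r1 e0) (r2 e0)) hS' hr'
    refine ⟨by simpa using ihS, ?_, ?_⟩
    · intro i j hex
      simp only [List.foldl_cons]
      obtain ⟨e, he, hv⟩ := hex
      rcases List.mem_cons.mp he with rfl | hmem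
      · by_cases htail : ∃ e ∈ l, r1 e = (i : Int) ∧ r2 e = (j : Int)
        · exact ih1 i j htail
        · rw [ih0 i j htail, ent_mset m n hS _ _ he0.1.1 he0.1.2 he0.2.1 he0.2.2,
              if_pos ⟨hv.1.symm, hv.2.symm⟩]
      · exact ih1 i j ⟨e, hmem, hv⟩
    · intro i j hnex
      simp only [List.foldl_cons]
      have htail : ¬ ∃ e ∈ l, r1 e = (i : Int) ∧ r2 e = (j : Int) :=
        fun ⟨e, he, hv⟩ => hnex ⟨e, by simp [he], hv⟩
      rw [ih0 i j htail, ent_mset m n hS _ _ he0.1.1 he0.1.2 he0.2.1 he0.2.2, if_neg]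
      intro ⟨hc1, hc2⟩
      exact hnex ⟨e0, by simp, hc1.symm, hc2.symm⟩

lemma row_fold (cs : List Int) (n : Nat)
    (hb : ∀ c ∈ cs, 0 ≤ c ∧ c < (n : Int)) :
    ∀ out : List Int, out.length = n →
    (cs.foldl (fun out c => PySem.List.pySetD out c 1) out).length = n ∧
    (∀ j : Nat, ((j:Int) ∈ cs) →
      (cs.foldl (fun out c => PySem.List.pySetD out c 1) out).getD j 0 = 1) ∧
    (∀ j : Nat, ¬ ((j:Int) ∈ cs) →
      (cs.foldl (fun out c => PySem.List.pySetD out c 1) out).getD j 0 = out.getD j 0) := by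
  induction cs with
  | nil => intro out hlen; exact ⟨hlen, by simp, by simp⟩
  | cons c0 cs ih =>
    intro out hlen
    have hc0 := hb c0 (by simp)
    have hb' : ∀ c ∈ cs, 0 ≤ c ∧ c < (n : Int) := fun c hc => hb c (by simp [hc])
    have hlen' : (PySem.List.pySetD out c0 1).length = n := by
      rw [PySem.List.pySetD_of_nonneg _ _ hc0.1, List.length_set]; exact hlen
    obtain ⟨ihL, ih1, ih0⟩ := ih hb' (PySem.List.pySetD out c0 1) hlen'
    have hstep : ∀ j : Nat, (PySem.List.pySetD out c0 1).getD j 0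
        = if j = c0.toNat ∧ c0.toNat < out.length then 1 else out.getD j 0 := by
      intro j
      rw [PySem.List.pySetD_of_nonneg _ _ hc0.1, getD_set_int]
    refine ⟨by simpa using ihL, ?_, ?_⟩
    · intro j hj
      simp only [List.foldl_cons]
      rcases List.mem_cons.mp hj with hj0 | hjm
    -- note : hj0 : ↑j = c0
      · by_cases htail : ((j:Int)) ∈ cs
        · exact ih1 j htail
        · rw [ih0 j htail, hstep, if_pos ⟨by omega, by omega⟩]
      · exact ih1 j hjm
    · intro j hj
      simp only [List.foldl_cons]
      have hj0 : ¬ ((j:Int)) ∈ cs := fun h => hj (by simp [h])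
      rw [ih0 j hj0, hstep, if_neg]
      rintro ⟨rfl, _⟩
      exact hj (by simp; omega)

lemma main_trivial (k f : Int) (hk : k ≤ 0) :
    wanless_example1 k f = wanless_example1_alt k f := by
  have h1 : PySem.List.pyRange 1 (k+1) 1 = [] :=
    PySem.List.pyRange_one_eq_nil (by omega)
  have h2 : max k 0 = 0 := by omega
  simp [wanless_example1, wanless_example1_alt, h1, h2, altCols, altRow,
    show (PySem.Dict.empty.insert PyKey.s (0:Int)).size = 1 from rfl,
    show (PySem.Dict.empty.insert PyKey.t (0:Int)).size = 1 from rfl,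
    show PySem.List.pyRange (0:Int) 1 1 = [0] from rfl,
    show PySem.List.pyRange (0:Int) 0 1 = [] from rfl,
    show PySem.List.pyRepeat [(0:Int)] 1 = [0] from rfl]

lemma hdec_lemma (k f i : Int) (hk : 1 ≤ k) (hf : 1 ≤ f) (hi1 : 1 ≤ i) (hi2 : i < k*k*f+1) :
    ∀ a b c : Int, 1 ≤ a → a ≤ k → 1 ≤ b → b ≤ k → 1 ≤ c → c ≤ f →
      (idx k f a b c = i ↔
        (a = PySem.Int.floordiv (PySem.Int.floordiv (i-1) f) k + 1 ∧
         b = PySem.Int.mod (PySem.Int.floordiv (i-1) f) k + 1 ∧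
         c = PySem.Int.mod (i-1) f + 1)) := by
  intro a b c ha1 ha2 hb1 hb2 hc1 hc2
  constructor
  · intro hidx
    have hx : i - 1 = ((a-1)*k + (b-1)) * f + (c-1) := by unfold idx at hidx; omega
    have t1 : 0 ≤ (a-1)*k := mul_nonneg (by omega) (by omega)
    have hd1 := dm_uniq (i-1) ((a-1)*k + (b-1)) (c-1) f (by omega) hx (by omega) (by omega)
    have hd2 := dm_uniq ((a-1)*k + (b-1)) (a-1) (b-1) k (by omega) rfl (by omega) (by omega)
    rw [hd1.1, hd1.2, hd2.1, hd2.2]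
    omega
  · rintro ⟨rfl, rfl, rfl⟩
    have h1 := PySem.Int.floordiv_mul_add_mod (i-1) f
    have h2 := PySem.Int.floordiv_mul_add_mod (PySem.Int.floordiv (i-1) f) k
    unfold idx
    ring_nf
    ring_nf at h1 h2
    nlinarith [h1, h2]

lemma altCols_iff (k f i j : Int) (hk : 1 ≤ k) (hf : 1 ≤ f)
    (hi : 0 ≤ i) (hi' : i < k*k*f+1) :
    j ∈ altCols k f i ↔
      ((∃ a b b1 c : Int, (1 ≤ a ∧ a ≤ k) ∧ (1 ≤ b ∧ b ≤ k) ∧ (1 ≤ b1 ∧ b1 ≤ k) ∧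
          (1 ≤ c ∧ c ≤ f) ∧ ¬(b = 1 ∧ b1 = 1) ∧ idx k f a b c = i ∧ idx k f a b1 c = j)
        ∨ (∃ a c : Int, (1 ≤ a ∧ a ≤ k) ∧ (1 ≤ c ∧ c ≤ f - 1) ∧
            idx k f a 1 c = i ∧ idx k f a 1 (c+1) = j)
        ∨ (∃ a : Int, (1 ≤ a ∧ a ≤ k) ∧ 0 = i ∧ idx k f a 1 1 = j)
        ∨ (∃ a : Int, (1 ≤ a ∧ a ≤ k) ∧ idx k f a 1 f = i ∧ 0 = j)) := by
  by_cases hi0 : i = 0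
  · subst hi0
    rw [show altCols k f 0 = (PySem.List.pyRange 0 k 1).map (fun a => 1 + a * k * f) from by
      simp [altCols]]
    constructor
    · intro hm
      rw [List.mem_map] at hm
      obtain ⟨a0, ha0, rfl⟩ := hm
      rw [PySem.List.mem_pyRange_one] at ha0
      exact Or.inr (Or.inr (Or.inl ⟨a0 + 1, ⟨by omega, by omega⟩, rfl, by unfold idx; ring⟩))
    · rintro (⟨a, b, b1, c, hA, hB, hB1, hC, hne, hidx, _⟩ |
              ⟨a, c, hA, hC, hidx, _⟩ | ⟨a, hA, _, hidx⟩ | ⟨a, hA, hidx, _⟩)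
      · exact absurd hidx (by have := idx_bounds k f a b c hk hf hA hB hC; omega)
      · exact absurd hidx (by
          have := idx_bounds k f a 1 c hk hf hA ⟨by omega, by omega⟩ ⟨by omega, by omega⟩
          omega)
      · rw [List.mem_map]
        exact ⟨a - 1, by rw [PySem.List.mem_pyRange_one]; omega,
          by rw [← hidx]; unfold idx; ring⟩
      · exact absurd hidx (by
          have := idx_bounds k f a 1 f hk hf hA ⟨by omega, by omega⟩ ⟨by omega, by omega⟩
          omega)
  · -- i ≥ 1 : decode
    have hi1 : 1 ≤ i := by omega
    set q := PySem.Int.floordiv (i-1) f with hq_def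
    set c0 := PySem.Int.mod (i-1) f with hc0_def
    set a0 := PySem.Int.floordiv q k with ha0_def
    set b0 := PySem.Int.mod q k with hb0_def
    have hc0 : 0 ≤ c0 ∧ c0 < f := ⟨PySem.Int.mod_nonneg _ (by omega), PySem.Int.mod_lt _ (by omega)⟩
    have hqe : q * f + c0 = i - 1 := PySem.Int.floordiv_mul_add_mod (i-1) f
    have hb0 : 0 ≤ b0 ∧ b0 < k := ⟨PySem.Int.mod_nonneg _ (by omega), PySem.Int.mod_lt _ (by omega)⟩
    have hae : a0 * k + b0 = q := PySem.Int.floordiv_mul_add_mod q k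
    have hqb : 0 ≤ q ∧ q < k * k := by
      constructor
      · nlinarith [hc0.1, hc0.2, hqe]
      · nlinarith [hc0.1, hc0.2, hqe]
    have ha0 : 0 ≤ a0 ∧ a0 < k := by
      constructor
      · nlinarith [hb0.1, hb0.2, hae]
      · nlinarith [hb0.1, hb0.2, hae]
    have hdec := hdec_lemma k f i hk hf hi1 hi'
    rw [← hq_def, ← hc0_def] at hdec
    rw [← ha0_def, ← hb0_def] at hdec
    rw [show altCols k f i
        = (if b0 = 0 then
            ((PySem.List.pyRange 0 k 1).filter
              (fun b1 => decide (0 < b0) || decide (0 < b1))).map (fun b1 => 1 + (a0*k+b1)*f+c0)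
            ++ [if c0 + 1 < f then 1 + a0*k*f + c0 + 1 else 0]
          else
            ((PySem.List.pyRange 0 k 1).filter
              (fun b1 => decide (0 < b0) || decide (0 < b1))).map (fun b1 => 1 + (a0*k+b1)*f+c0)) from by
      simp only [altCols, if_neg hi0]
      rfl]
    have hout : (j ∈ ((PySem.List.pyRange 0 k 1).filter
          (fun b1 => decide (0 < b0) || decide (0 < b1))).map (fun b1 => 1 + (a0*k+b1)*f+c0))
        ↔ (∃ b1' : Int, (0 ≤ b1' ∧ b1' < k) ∧ (0 < b0 ∨ 0 < b1') ∧ j = 1 + (a0*k+b1')*f+c0) := by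
      simp only [List.mem_map, List.mem_filter, PySem.List.mem_pyRange_one,
        Bool.or_eq_true, decide_eq_true_eq]
      constructor
      · rintro ⟨b1', ⟨hb1', hcond⟩, rfl⟩; exact ⟨b1', hb1', hcond, rfl⟩
      · rintro ⟨b1', hb1', hcond, rfl⟩; exact ⟨b1', ⟨hb1', hcond⟩, rfl⟩
    have houtA : (∃ b1' : Int, (0 ≤ b1' ∧ b1' < k) ∧ (0 < b0 ∨ 0 < b1') ∧ j = 1 + (a0*k+b1')*f+c0)
        ↔ (∃ a b b1 c : Int, (1 ≤ a ∧ a ≤ k) ∧ (1 ≤ b ∧ b ≤ k) ∧ (1 ≤ b1 ∧ b1 ≤ k) ∧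
            (1 ≤ c ∧ c ≤ f) ∧ ¬(b = 1 ∧ b1 = 1) ∧ idx k f a b c = i ∧ idx k f a b1 c = j) := by
      constructor
      · rintro ⟨b1', hb1', hcond, rfl⟩
        refine ⟨a0 + 1, b0 + 1, b1' + 1, c0 + 1, ⟨by omega, by omega⟩, ⟨by omega, by omega⟩,
          ⟨by omega, by omega⟩, ⟨by omega, by omega⟩, by omega, ?_, ?_⟩
        · rw [hdec (a0+1) (b0+1) (c0+1) (by omega) (by omega) (by omega) (by omega)
            (by omega) (by omega)]
          omega
        · unfold idx; ring
      · rintro ⟨a, b, b1, c, hA, hB, hB1, hC, hne, hidx, rfl⟩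
        rw [hdec a b c hA.1 hA.2 hB.1 hB.2 hC.1 hC.2] at hidx
        refine ⟨b1 - 1, ⟨by omega, by omega⟩, by omega, ?_⟩
        unfold idx
        have : a = a0 + 1 ∧ b = b0 + 1 ∧ c = c0 + 1 := hidx
        obtain ⟨rfl, rfl, rfl⟩ := this
        ring
    have hA2 : (∃ a c : Int, (1 ≤ a ∧ a ≤ k) ∧ (1 ≤ c ∧ c ≤ f - 1) ∧
          idx k f a 1 c = i ∧ idx k f a 1 (c+1) = j)
        ↔ (b0 = 0 ∧ c0 + 1 < f ∧ j = 1 + a0*k*f + c0 + 1) := by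
      constructor
      · rintro ⟨a, c, hA, hC, hidx, rfl⟩
        rw [hdec a 1 c hA.1 hA.2 (by omega) (by omega) hC.1 (by omega)] at hidx
        obtain ⟨rfl, hb, rfl⟩ := hidx
        refine ⟨by omega, by omega, ?_⟩
        unfold idx; ring
      · rintro ⟨hb0z, hcf, rfl⟩
        refine ⟨a0 + 1, c0 + 1, ⟨by omega, by omega⟩, ⟨by omega, by omega⟩, ?_, ?_⟩
        · rw [hdec (a0+1) 1 (c0+1) (by omega) (by omega) (by omega) (by omega)
            (by omega) (by omega)]
          omega
        · unfold idx; ring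
    have hA3 : ¬ (∃ a : Int, (1 ≤ a ∧ a ≤ k) ∧ 0 = i ∧ idx k f a 1 1 = j) := by
      rintro ⟨a, _, h0, _⟩; omega
    have hA4 : (∃ a : Int, (1 ≤ a ∧ a ≤ k) ∧ idx k f a 1 f = i ∧ 0 = j)
        ↔ (b0 = 0 ∧ ¬ (c0 + 1 < f) ∧ j = 0) := by
      constructor
      · rintro ⟨a, hA, hidx, hj0⟩
        rw [hdec a 1 f hA.1 hA.2 (by omega) (by omega) (by omega) (by omega)] at hidx
        exact ⟨by omega, by omega, by omega⟩
      · rintro ⟨hb0z, hcf, rfl⟩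
        refine ⟨a0 + 1, ⟨by omega, by omega⟩, ?_, rfl⟩
        rw [hdec (a0+1) 1 f (by omega) (by omega) (by omega) (by omega) (by omega) (by omega)]
        omega
    by_cases hb0z : b0 = 0
    · rw [if_pos hb0z]
      simp only [List.mem_append, List.mem_singleton, hout]
      rw [houtA]
      constructor
      · rintro (h1 | h2)
        · exact Or.inl h1
        · by_cases hcf : c0 + 1 < f
          · rw [if_pos hcf] at h2
            exact Or.inr (Or.inl (hA2.mpr ⟨hb0z, hcf, by omega⟩))
          · rw [if_neg hcf] at h2
            exact Or.inr (Or.inr (Or.inr (hA4.mpr ⟨hb0z, hcf, h2⟩)))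
      · rintro (h1 | h2 | h3 | h4)
        · exact Or.inl h1
        · obtain ⟨_, hcf, hj'⟩ := hA2.mp h2
          exact Or.inr (by rw [if_pos hcf]; omega)
        · exact absurd h3 hA3
        · obtain ⟨_, hcf, hj'⟩ := hA4.mp h4
          exact Or.inr (by rw [if_neg hcf]; omega)
    · rw [if_neg hb0z]
      rw [hout, houtA]
      constructor
      · exact fun h => Or.inl h
      · rintro (h1 | h2 | h3 | h4)
        · exact h1
        · exact absurd (hA2.mp h2).1 hb0z
        · exact absurd h3 hA3
        · exact absurd (hA4.mp h4).1 hb0z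

def l1ex (k f : Int) : List (Int × Int × Int × Int) :=
  (PySem.List.pyRange 1 (k+1) 1).flatMap (fun a =>
    (PySem.List.pyRange 1 (k+1) 1).flatMap (fun b =>
      (PySem.List.pyRange 1 (k+1) 1).flatMap (fun b1 =>
        (PySem.List.pyRange 1 (f+1) 1).map (fun c => (a, b, b1, c)))))

def l2ex (k f : Int) : List (Int × Int) :=
  (PySem.List.pyRange 1 (k+1) 1).flatMap (fun a =>
    (PySem.List.pyRange 1 f 1).map (fun c => (a, c)))

lemma reshape_l1 (k f : Int) (D1 D2 : PySem.Dict PyKey Int) (m : List (List Int)) :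
    (PySem.List.pyRange 1 (k+1) 1).foldl (fun m a =>
      (PySem.List.pyRange 1 (k+1) 1).foldl (fun m b =>
        (PySem.List.pyRange 1 (k+1) 1).foldl (fun m b1 =>
          (PySem.List.pyRange 1 (f+1) 1).foldl (fun m c =>
            if b = 1 ∧ b1 = 1 then m
            else mset m (D1.getD (PyKey.abc a b c) 0) (D2.getD (PyKey.abc a b1 c) 0)) m) m) m) m
    = ((l1ex k f).filter (fun e => decide (¬ (e.2.1 = 1 ∧ e.2.2.1 = 1)))).foldl
        (fun m e => mset m (D1.getD (PyKey.abc e.1 e.2.1 e.2.2.2) 0)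
          (D2.getD (PyKey.abc e.1 e.2.2.1 e.2.2.2) 0)) m := by
  rw [← PySem.List.foldl_ite_eq_foldl_filter]
  simp only [l1ex, List.foldl_flatMap, List.foldl_map, ite_not]

lemma reshape_l2 (k f : Int) (D1 D2 : PySem.Dict PyKey Int) (m : List (List Int)) :
    (PySem.List.pyRange 1 (k+1) 1).foldl (fun m a =>
      (PySem.List.pyRange 1 f 1).foldl (fun m c =>
        mset m (D1.getD (PyKey.abc a 1 c) 0) (D2.getD (PyKey.abc a 1 (c+1)) 0)) m) m
    = (l2ex k f).foldl (fun m e =>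
        mset m (D1.getD (PyKey.abc e.1 1 e.2) 0) (D2.getD (PyKey.abc e.1 1 (e.2+1)) 0)) m := by
  simp only [l2ex, List.foldl_flatMap, List.foldl_map]
lemma main_pos (k f : Int) (hk : 1 ≤ k) (hf : 1 ≤ f) :
    wanless_example1 k f = wanless_example1_alt k f := by
  have hNpos : 0 ≤ k * k * f := by positivity
  have hn : (((k*k*f+1).toNat : Nat) : Int) = k*k*f+1 := Int.toNat_of_nonneg (by omega)
  simp only [wanless_example1]
  rw [quad_eq]
  dsimp only
  set KB := keyBlk (PySem.List.pyRange 1 (k+1) 1) (PySem.List.pyRange 1 (k+1) 1)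
    (PySem.List.pyRange 1 (f+1) 1) with hKB
  set D1 := (KB.foldl pstep (PySem.Dict.empty.insert PyKey.s 0, 1)).1 with hD1
  set D2 := (KB.foldl pstep (PySem.Dict.empty.insert PyKey.t 0, 1)).1 with hD2
  -- dict lookups are the closed-form index
  have hd1 : ∀ a b c : Int, 1 ≤ a → a ≤ k → 1 ≤ b → b ≤ k → 1 ≤ c → c ≤ f →
      D1.getD (PyKey.abc a b c) 0 = idx k f a b c := by
    intro a b c h1 h2 h3 h4 h5 h6
    rw [hD1, PySem.Dict.getD_eq_get?_getD,
      dict_get_abc k f hk hf a b c ⟨h1,h2⟩ ⟨h3,h4⟩ ⟨h5,h6⟩]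
    rfl
  have hd2 : ∀ a b c : Int, 1 ≤ a → a ≤ k → 1 ≤ b → b ≤ k → 1 ≤ c → c ≤ f →
      D2.getD (PyKey.abc a b c) 0 = idx k f a b c := by
    intro a b c h1 h2 h3 h4 h5 h6
    rw [hD2, PySem.Dict.getD_eq_get?_getD,
      dict_get_abc k f hk hf a b c ⟨h1,h2⟩ ⟨h3,h4⟩ ⟨h5,h6⟩]
    rfl
  have hd1s : D1.getD PyKey.s 0 = 0 := by
    rw [hD1, PySem.Dict.getD_eq_get?_getD,
      pfold_get_notmem _ _ (s_notmem_keyBlk _ _ _), PySem.Dict.get?_insert_self]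
    rfl
  have hd2t : D2.getD PyKey.t 0 = 0 := by
    rw [hD2, PySem.Dict.getD_eq_get?_getD,
      pfold_get_notmem _ _ (t_notmem_keyBlk _ _ _), PySem.Dict.get?_insert_self]
    rfl
  -- sizes
  have hKlen : KB.length = (k*k*f).toNat := by
    rw [hKB, len_keyBlk]
    have e1 : (k+1-1).toNat = k.toNat := by omega
    have e2 : (f+1-1).toNat = f.toNat := by omega
    rw [e1, e2]
    have ek : (k.toNat : Int) = k := Int.toNat_of_nonneg (by omega)
    have ef : (f.toNat : Int) = f := Int.toNat_of_nonneg (by omega)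
    have hcast : ((k.toNat * (k.toNat * f.toNat) : Nat) : Int) = k*k*f := by
      push_cast [ek, ef]; ring
    omega
  have hsz1 : ((D1.size : Nat) : Int) = k*k*f + 1 := by
    rw [hD1, pfold_size KB _ 1 ?fresh ?nd]
    case fresh =>
      intro x hx
      rw [hKB] at hx
      rcases x with _ | _ | ⟨a,b,c⟩
      · exact absurd hx (s_notmem_keyBlk _ _ _)
      · rfl
      · rfl
    case nd =>
      rw [hKB]
      exact nodup_keyBlk _ _ _ (PySem.List.nodup_pyRange_one _ _)
        (PySem.List.nodup_pyRange_one _ _) (PySem.List.nodup_pyRange_one _ _)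
    rw [hKlen, show (PySem.Dict.empty.insert PyKey.s (0:Int)).size = 1 from rfl]
    omega
  have hsz2 : ((D2.size : Nat) : Int) = k*k*f + 1 := by
    rw [hD2, pfold_size KB _ 1 ?fresh ?nd]
    case fresh =>
      intro x hx
      rw [hKB] at hx
      rcases x with _ | _ | ⟨a,b,c⟩
      · rfl
      · exact absurd hx (t_notmem_keyBlk _ _ _)
      · rfl
    case nd =>
      rw [hKB]
      exact nodup_keyBlk _ _ _ (PySem.List.nodup_pyRange_one _ _)
        (PySem.List.nodup_pyRange_one _ _) (PySem.List.nodup_pyRange_one _ _)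
    rw [hKlen, show (PySem.Dict.empty.insert PyKey.t (0:Int)).size = 1 from rfl]
    omega
  rw [hsz1, hsz2]
  -- the zero matrix
  rw [show ((PySem.List.pyRange 0 (k*k*f+1) 1).map
        (fun _ => PySem.List.pyRepeat [(0:Int)] (k*k*f+1)))
      = List.replicate (k*k*f+1).toNat (List.replicate (k*k*f+1).toNat 0) from by
    rw [PySem.List.pyRepeat_singleton, List.map_const', PySem.List.length_pyRange_one]
    norm_num]
  -- reshape the fill loops
  rw [reshape_l1 k f D1 D2, reshape_l2 k f D1 D2]
  -- replace dict lookups by the closed-form index in all four loops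
  have e1 : ∀ M : List (List Int),
      ((l1ex k f).filter (fun e => decide (¬ (e.2.1 = 1 ∧ e.2.2.1 = 1)))).foldl
        (fun m e => mset m (D1.getD (PyKey.abc e.1 e.2.1 e.2.2.2) 0)
          (D2.getD (PyKey.abc e.1 e.2.2.1 e.2.2.2) 0)) M
      = ((l1ex k f).filter (fun e => decide (¬ (e.2.1 = 1 ∧ e.2.2.1 = 1)))).foldl
        (fun m e => mset m (idx k f e.1 e.2.1 e.2.2.2) (idx k f e.1 e.2.2.1 e.2.2.2)) M := by
    intro M
    apply PySem.List.foldl_congr_mem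
    intro acc e he
    have hmem := (List.mem_filter.mp he).1
    simp only [l1ex, List.mem_flatMap, List.mem_map] at hmem
    obtain ⟨a, ha, b, hb, b1, hb1, c, hc, rfl⟩ := hmem
    rw [PySem.List.mem_pyRange_one] at ha hb hb1 hc
    rw [show ((a,b,b1,c) : Int × Int × Int × Int).1 = a from rfl]
    rw [show ((a,b,b1,c) : Int × Int × Int × Int).2.1 = b from rfl]
    rw [show ((a,b,b1,c) : Int × Int × Int × Int).2.2.1 = b1 from rfl]
    rw [show ((a,b,b1,c) : Int × Int × Int × Int).2.2.2 = c from rfl]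
    rw [hd1 a b c (by omega) (by omega) (by omega) (by omega) (by omega) (by omega),
        hd2 a b1 c (by omega) (by omega) (by omega) (by omega) (by omega) (by omega)]
  have e2 : ∀ M : List (List Int),
      (l2ex k f).foldl (fun m e =>
        mset m (D1.getD (PyKey.abc e.1 1 e.2) 0) (D2.getD (PyKey.abc e.1 1 (e.2+1)) 0)) M
      = (l2ex k f).foldl (fun m e =>
        mset m (idx k f e.1 1 e.2) (idx k f e.1 1 (e.2+1))) M := by
    intro M
    apply PySem.List.foldl_congr_mem
    intro acc e he
    simp only [l2ex, List.mem_flatMap, List.mem_map] at he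
    obtain ⟨a, ha, c, hc, rfl⟩ := he
    rw [PySem.List.mem_pyRange_one] at ha hc
    rw [show ((a,c) : Int × Int).1 = a from rfl, show ((a,c) : Int × Int).2 = c from rfl]
    rw [hd1 a 1 c (by omega) (by omega) (by omega) (by omega) (by omega) (by omega),
        hd2 a 1 (c+1) (by omega) (by omega) (by omega) (by omega) (by omega) (by omega)]
  have e3 : ∀ M : List (List Int),
      (PySem.List.pyRange 1 (k+1) 1).foldl (fun m a =>
        mset m (D1.getD PyKey.s 0) (D2.getD (PyKey.abc a 1 1) 0)) M
      = (PySem.List.pyRange 1 (k+1) 1).foldl (fun m a =>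
        mset m 0 (idx k f a 1 1)) M := by
    intro M
    apply PySem.List.foldl_congr_mem
    intro acc a ha
    rw [PySem.List.mem_pyRange_one] at ha
    rw [hd1s, hd2 a 1 1 (by omega) (by omega) (by omega) (by omega) (by omega) (by omega)]
  have e4 : ∀ M : List (List Int),
      (PySem.List.pyRange 1 (k+1) 1).foldl (fun m a =>
        mset m (D1.getD (PyKey.abc a 1 f) 0) (D2.getD PyKey.t 0)) M
      = (PySem.List.pyRange 1 (k+1) 1).foldl (fun m a =>
        mset m (idx k f a 1 f) 0) M := by
    intro M
    apply PySem.List.foldl_congr_mem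
    intro acc a ha
    rw [PySem.List.mem_pyRange_one] at ha
    rw [hd2t, hd1 a 1 f (by omega) (by omega) (by omega) (by omega) (by omega) (by omega)]
  rw [e1, e2, e3, e4]
  -- characterize the four fill loops
  have hS0 : Shape (List.replicate (k*k*f+1).toNat (List.replicate (k*k*f+1).toNat (0:Int)))
      ((k*k*f+1).toNat) := by
    constructor
    · exact List.length_replicate
    · intro i hi
      rw [List.getD_eq_getElem?_getD, List.getElem?_replicate, if_pos hi]
      exact List.length_replicate
  have hent0 : ∀ i j : Nat,
      ent (List.replicate (k*k*f+1).toNat (List.replicate (k*k*f+1).toNat (0:Int))) i j = 0 := by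
    intro i j
    by_cases hi : i < (k*k*f+1).toNat <;> by_cases hj : j < (k*k*f+1).toNat <;>
      simp [ent, List.getD_eq_getElem?_getD, List.getElem?_replicate, hi, hj]
  have hbd1 : ∀ e ∈ (l1ex k f).filter (fun e => decide (¬ (e.2.1 = 1 ∧ e.2.2.1 = 1))),
      (0 ≤ idx k f e.1 e.2.1 e.2.2.2 ∧ idx k f e.1 e.2.1 e.2.2.2 < (((k*k*f+1).toNat : Nat) : Int)) ∧
      (0 ≤ idx k f e.1 e.2.2.1 e.2.2.2 ∧ idx k f e.1 e.2.2.1 e.2.2.2 < (((k*k*f+1).toNat : Nat) : Int)) := by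
    intro e he
    have hmem := (List.mem_filter.mp he).1
    simp only [l1ex, List.mem_flatMap, List.mem_map] at hmem
    obtain ⟨a, ha, b, hb, b1, hb1, c, hc, rfl⟩ := hmem
    rw [PySem.List.mem_pyRange_one] at ha hb hb1 hc
    have i1 := idx_bounds k f a b c hk hf ⟨by omega, by omega⟩ ⟨by omega, by omega⟩ ⟨by omega, by omega⟩
    have i2 := idx_bounds k f a b1 c hk hf ⟨by omega, by omega⟩ ⟨by omega, by omega⟩ ⟨by omega, by omega⟩
    dsimp only
    exact ⟨⟨by omega, by omega⟩, ⟨by omega, by omega⟩⟩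
  have hbd2 : ∀ e ∈ l2ex k f,
      (0 ≤ idx k f e.1 1 e.2 ∧ idx k f e.1 1 e.2 < (((k*k*f+1).toNat : Nat) : Int)) ∧
      (0 ≤ idx k f e.1 1 (e.2+1) ∧ idx k f e.1 1 (e.2+1) < (((k*k*f+1).toNat : Nat) : Int)) := by
    intro e he
    simp only [l2ex, List.mem_flatMap, List.mem_map] at he
    obtain ⟨a, ha, c, hc, rfl⟩ := he
    rw [PySem.List.mem_pyRange_one] at ha hc
    have i1 := idx_bounds k f a 1 c hk hf ⟨by omega, by omega⟩ ⟨by omega, by omega⟩ ⟨by omega, by omega⟩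
    have i2 := idx_bounds k f a 1 (c+1) hk hf ⟨by omega, by omega⟩ ⟨by omega, by omega⟩ ⟨by omega, by omega⟩
    dsimp only
    exact ⟨⟨by omega, by omega⟩, ⟨by omega, by omega⟩⟩
  have hbd3 : ∀ a ∈ PySem.List.pyRange 1 (k+1) 1,
      (0 ≤ (0:Int) ∧ (0:Int) < (((k*k*f+1).toNat : Nat) : Int)) ∧
      (0 ≤ idx k f a 1 1 ∧ idx k f a 1 1 < (((k*k*f+1).toNat : Nat) : Int)) := by
    intro a ha
    rw [PySem.List.mem_pyRange_one] at ha
    have i2 := idx_bounds k f a 1 1 hk hf ⟨by omega, by omega⟩ ⟨by omega, by omega⟩ ⟨by omega, by omega⟩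
    exact ⟨⟨by omega, by omega⟩, ⟨by omega, by omega⟩⟩
  have hbd4 : ∀ a ∈ PySem.List.pyRange 1 (k+1) 1,
      (0 ≤ idx k f a 1 f ∧ idx k f a 1 f < (((k*k*f+1).toNat : Nat) : Int)) ∧
      (0 ≤ (0:Int) ∧ (0:Int) < (((k*k*f+1).toNat : Nat) : Int)) := by
    intro a ha
    rw [PySem.List.mem_pyRange_one] at ha
    have i1 := idx_bounds k f a 1 f hk hf ⟨by omega, by omega⟩ ⟨by omega, by omega⟩ ⟨by omega, by omega⟩
    exact ⟨⟨by omega, by omega⟩, ⟨by omega, by omega⟩⟩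
  obtain ⟨S1, W1, Z1⟩ := fill_fold ((l1ex k f).filter (fun e => decide (¬ (e.2.1 = 1 ∧ e.2.2.1 = 1))))
    (fun e => idx k f e.1 e.2.1 e.2.2.2) (fun e => idx k f e.1 e.2.2.1 e.2.2.2)
    ((k*k*f+1).toNat)
    (List.replicate (k*k*f+1).toNat (List.replicate (k*k*f+1).toNat (0:Int))) hS0 hbd1
  obtain ⟨S2, W2, Z2⟩ := fill_fold (l2ex k f)
    (fun e => idx k f e.1 1 e.2) (fun e => idx k f e.1 1 (e.2+1))
    ((k*k*f+1).toNat) _ S1 hbd2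
  obtain ⟨S3, W3, Z3⟩ := fill_fold (PySem.List.pyRange 1 (k+1) 1)
    (fun _ => (0:Int)) (fun a => idx k f a 1 1)
    ((k*k*f+1).toNat) _ S2 hbd3
  obtain ⟨S4, W4, Z4⟩ := fill_fold (PySem.List.pyRange 1 (k+1) 1)
    (fun a => idx k f a 1 f) (fun _ => (0:Int))
    ((k*k*f+1).toNat) _ S3 hbd4
  set M1 := List.foldl (fun m e => mset m (idx k f e.1 e.2.1 e.2.2.2) (idx k f e.1 e.2.2.1 e.2.2.2))
    (List.replicate (k*k*f+1).toNat (List.replicate (k*k*f+1).toNat (0:Int)))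
    ((l1ex k f).filter (fun e => decide (¬ (e.2.1 = 1 ∧ e.2.2.1 = 1)))) with hM1
  set M2 := List.foldl (fun m e => mset m (idx k f e.1 1 e.2) (idx k f e.1 1 (e.2+1)))
    M1 (l2ex k f) with hM2
  set M3 := List.foldl (fun m a => mset m 0 (idx k f a 1 1)) M2 (PySem.List.pyRange 1 (k+1) 1)
    with hM3
  set M4 := List.foldl (fun m a => mset m (idx k f a 1 f) 0) M3 (PySem.List.pyRange 1 (k+1) 1)
    with hM4
  have up2 : ∀ i j : Nat, ent M1 i j = 1 → ent M2 i j = 1 := by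
    intro i j h
    by_cases hE : ∃ e ∈ l2ex k f, idx k f e.1 1 e.2 = (i:Int) ∧ idx k f e.1 1 (e.2+1) = (j:Int)
    · exact W2 i j hE
    · rw [Z2 i j hE]; exact h
  have up3 : ∀ i j : Nat, ent M2 i j = 1 → ent M3 i j = 1 := by
    intro i j h
    by_cases hE : ∃ a ∈ PySem.List.pyRange 1 (k+1) 1, (0:Int) = (i:Int) ∧ idx k f a 1 1 = (j:Int)
    · exact W3 i j hE
    · rw [Z3 i j hE]; exact h
  have up4 : ∀ i j : Nat, ent M3 i j = 1 → ent M4 i j = 1 := by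
    intro i j h
    by_cases hE : ∃ a ∈ PySem.List.pyRange 1 (k+1) 1, idx k f a 1 f = (i:Int) ∧ (0:Int) = (j:Int)
    · exact W4 i j hE
    · rw [Z4 i j hE]; exact h
  simp only [wanless_example1_alt]
  rw [show max k 0 = k from by omega, show max f 0 = f from by omega]
  apply List.ext_getElem
  · rw [S4.1, List.length_map, PySem.List.length_pyRange_one]
    omega
  · intro i h1 h2
    have hi : i < (k*k*f+1).toNat := by rw [S4.1] at h1; exact h1
    rw [List.getElem_map, PySem.List.getElem_pyRange_one, zero_add]
    have hrowlen : M4[i].length = (k*k*f+1).toNat := by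
      have := S4.2 i hi
      rw [List.getD_eq_getElem M4 [] h1] at this
      exact this
    -- the 1-columns of this row are in range
    have hcolb : ∀ c ∈ altCols k f ((i:Int)), 0 ≤ c ∧ c < k*k*f+1 := by
      intro x hx
      rcases (altCols_iff k f i x hk hf (by omega) (by omega)).mp hx with
        ⟨a, b, b1, c, hA, hB, hB1, hC, _, _, hjb⟩ | ⟨a, c, hA, hC, _, hjb⟩ |
        ⟨a, hA, _, hjb⟩ | ⟨a, hA, _, hj0⟩
      · have := idx_bounds k f a b1 c hk hf hA hB1 hC
        omega
      · have := idx_bounds k f a 1 (c+1) hk hf hA ⟨by omega, by omega⟩ ⟨by omega, by omega⟩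
        omega
      · have := idx_bounds k f a 1 1 hk hf hA ⟨by omega, by omega⟩ ⟨by omega, by omega⟩
        omega
      · omega
    have hreplen : (PySem.List.pyRepeat [(0:Int)] (k*k*f+1)).length = (k*k*f+1).toNat := by
      rw [PySem.List.pyRepeat_singleton, List.length_replicate]
    obtain ⟨hL, hOne, hZero⟩ := row_fold (altCols k f ((i:Int))) ((k*k*f+1).toNat)
      (fun c hc => ⟨(hcolb c hc).1, by have := (hcolb c hc).2; omega⟩)
      (PySem.List.pyRepeat [(0:Int)] (k*k*f+1)) hreplen
    simp only [altRow]
    apply List.ext_getElem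
    · rw [hrowlen, hL]
    · intro j hj1 hj2
      have hj : j < (k*k*f+1).toNat := by rw [hrowlen] at hj1; exact hj1
      have hent : M4[i][j] = ent M4 i j := by
        unfold ent
        rw [List.getD_eq_getElem M4 [] h1, List.getD_eq_getElem _ _ hj1]
      rw [hent, show ((altCols k f ((i:Int))).foldl
            (fun out c => PySem.List.pySetD out c 1)
            (PySem.List.pyRepeat [(0:Int)] (k*k*f+1)))[j]'hj2
          = ((altCols k f ((i:Int))).foldl (fun out c => PySem.List.pySetD out c 1)
            (PySem.List.pyRepeat [(0:Int)] (k*k*f+1))).getD j 0 from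
        (List.getD_eq_getElem _ 0 hj2).symm]
      by_cases hmem : ((j:Int)) ∈ altCols k f ((i:Int))
      · rw [hOne j hmem]
        rcases (altCols_iff k f i j hk hf (by omega) (by omega)).mp hmem with h1' | h2' | h3' | h4'
        · refine up4 i j (up3 i j (up2 i j (W1 i j ?_)))
          obtain ⟨a, b, b1, c, hA, hB, hB1, hC, hne, hia, hjb⟩ := h1'
          refine ⟨(a,b,b1,c), ?_, by dsimp only; exact hia, by dsimp only; exact hjb⟩
          rw [List.mem_filter]
          constructor
          · simp only [l1ex, List.mem_flatMap, List.mem_map]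
            exact ⟨a, by rw [PySem.List.mem_pyRange_one]; omega,
              b, by rw [PySem.List.mem_pyRange_one]; omega,
              b1, by rw [PySem.List.mem_pyRange_one]; omega,
              c, by rw [PySem.List.mem_pyRange_one]; omega, rfl⟩
          · simp only [decide_eq_true_eq]
            exact hne
        · refine up4 i j (up3 i j (W2 i j ?_))
          obtain ⟨a, c, hA, hC, hia, hjb⟩ := h2'
          refine ⟨(a,c), ?_, by dsimp only; exact hia, by dsimp only; exact hjb⟩
          simp only [l2ex, List.mem_flatMap, List.mem_map]
          exact ⟨a, by rw [PySem.List.mem_pyRange_one]; omega,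
            c, by rw [PySem.List.mem_pyRange_one]; omega, rfl⟩
        · refine up4 i j (W3 i j ?_)
          obtain ⟨a, hA, hi0, hjb⟩ := h3'
          exact ⟨a, by rw [PySem.List.mem_pyRange_one]; omega, hi0, hjb⟩
        · refine W4 i j ?_
          obtain ⟨a, hA, hia, hj0⟩ := h4'
          exact ⟨a, by rw [PySem.List.mem_pyRange_one]; omega, hia, hj0⟩
      · rw [hZero j hmem, show (PySem.List.pyRepeat [(0:Int)] (k*k*f+1)).getD j 0 = 0 from by
          rw [PySem.List.pyRepeat_singleton, List.getD_eq_getElem?_getD, List.getElem?_replicate,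
            if_pos hj]
          rfl]
        have nE4 : ¬ ∃ a ∈ PySem.List.pyRange 1 (k+1) 1,
            idx k f a 1 f = (i:Int) ∧ (0:Int) = (j:Int) := by
          rintro ⟨a, ha, hia, hj0⟩
          rw [PySem.List.mem_pyRange_one] at ha
          exact hmem ((altCols_iff k f i j hk hf (by omega) (by omega)).mpr
            (Or.inr (Or.inr (Or.inr ⟨a, ⟨by omega, by omega⟩, hia, hj0⟩))))
        have nE3 : ¬ ∃ a ∈ PySem.List.pyRange 1 (k+1) 1,
            (0:Int) = (i:Int) ∧ idx k f a 1 1 = (j:Int) := by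
          rintro ⟨a, ha, hi0, hjb⟩
          rw [PySem.List.mem_pyRange_one] at ha
          exact hmem ((altCols_iff k f i j hk hf (by omega) (by omega)).mpr
            (Or.inr (Or.inr (Or.inl ⟨a, ⟨by omega, by omega⟩, hi0, hjb⟩))))
        have nE2 : ¬ ∃ e ∈ l2ex k f,
            idx k f e.1 1 e.2 = (i:Int) ∧ idx k f e.1 1 (e.2+1) = (j:Int) := by
          rintro ⟨e, he, hia, hjb⟩
          simp only [l2ex, List.mem_flatMap, List.mem_map] at he
          obtain ⟨a, ha, c, hc, rfl⟩ := he
          rw [PySem.List.mem_pyRange_one] at ha hc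
          dsimp only at hia hjb
          exact hmem ((altCols_iff k f i j hk hf (by omega) (by omega)).mpr
            (Or.inr (Or.inl ⟨a, c, ⟨by omega, by omega⟩, ⟨by omega, by omega⟩, hia, hjb⟩)))
        have nE1 : ¬ ∃ e ∈ (l1ex k f).filter (fun e => decide (¬ (e.2.1 = 1 ∧ e.2.2.1 = 1))),
            idx k f e.1 e.2.1 e.2.2.2 = (i:Int) ∧ idx k f e.1 e.2.2.1 e.2.2.2 = (j:Int) := by
          rintro ⟨e, he, hia, hjb⟩
          have hcond := (List.mem_filter.mp he).2
          have hmem' := (List.mem_filter.mp he).1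
          simp only [l1ex, List.mem_flatMap, List.mem_map] at hmem'
          obtain ⟨a, ha, b, hb, b1, hb1, c, hc, rfl⟩ := hmem'
          rw [PySem.List.mem_pyRange_one] at ha hb hb1 hc
          simp only [decide_eq_true_eq] at hcond
          dsimp only at hia hjb hcond
          exact hmem ((altCols_iff k f i j hk hf (by omega) (by omega)).mpr
            (Or.inl ⟨a, b, b1, c, ⟨by omega, by omega⟩, ⟨by omega, by omega⟩,
              ⟨by omega, by omega⟩, ⟨by omega, by omega⟩, hcond, hia, hjb⟩))
        rw [Z4 i j nE4, Z3 i j nE3, Z2 i j nE2, Z1 i j nE1]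
        exact hent0 i j

-- ===== VERDICT (by name: the statement is the Claim_ definition above) =====
theorem wanless_example1_spec : Claim_equal_wanless_example1 := by
  intro k f _ hpre
  unfold Spec_wanless_example1
  rcases lt_or_ge 0 k with hk | hk
  · rcases hpre with h | h
    · omega
    · exact main_pos k f (by omega) h
  · exact main_trivial k f (by omega)
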